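-- pv_equiv track=rewrite | github.com/sacmad21/whatsAgency | campaign/actions/prelaunch/create_and_distribute_teasers.py | parse_teaser_block
-- ===== SOURCE A (Python) =====
-- def parse_teaser_block(block: str) -> list:
--     """
--     Parses AI teaser block expecting structure:
--     Platform: ...
--     TeaserTheme: ...
--     Message: ...
--     Recommended Launch Date: ...
--     """
--     teasers = []
--     current = {}
--     lines = block.strip().split("\n")
--     for line in lines:
--         if line.startswith("Platform:"):
--             if current:
--                 teasers.append(current)
--                 current = {}
--             current["platform"] = line.split(":", 1)[1].strip()
--         elif line.startswith("TeaserTheme:"):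
--             current["teaser_theme"] = line.split(":", 1)[1].strip()
--         elif line.startswith("Message:"):
--             current["message"] = line.split(":", 1)[1].strip()
--     if current:
--         teasers.append(current)
--     return teasers
-- ===== SOURCE B (Python) =====
-- def parse_teaser_block(block: str) -> list:
--     """Split-then-map: cut the stripped block into segments at 'Platform:' lines,
--     then turn each segment into a dict, keeping only non-empty dicts."""
--     lines = block.strip().split("\n")
--     segments = []
--     seg = []
--     for line in lines:
--         if line.startswith("Platform:"):
--             segments.append(seg)
--             seg = []
--         seg.append(line)
--     segments.append(seg)
--
--     teasers = []
--     for seg in segments: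
--         d = {}
--         for line in seg:
--             if line.startswith("Platform:"):
--                 d["platform"] = line.split(":", 1)[1].strip()
--             elif line.startswith("TeaserTheme:"):
--                 d["teaser_theme"] = line.split(":", 1)[1].strip()
--             elif line.startswith("Message:"):
--                 d["message"] = line.split(":", 1)[1].strip()
--         if d:
--             teasers.append(d)
--     return teasers
-- ===== Notes on version B (the rewrite author's own statement) =====
-- stated objective: alternative
-- what changed: Replaced A's single interleaved accumulator loop with flush guard by a two-stage pipeline: first cut the line list into segments at 'Platform:' lines, then map each segment to a record, keeping only non-empty ones.
import Mathlib
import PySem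

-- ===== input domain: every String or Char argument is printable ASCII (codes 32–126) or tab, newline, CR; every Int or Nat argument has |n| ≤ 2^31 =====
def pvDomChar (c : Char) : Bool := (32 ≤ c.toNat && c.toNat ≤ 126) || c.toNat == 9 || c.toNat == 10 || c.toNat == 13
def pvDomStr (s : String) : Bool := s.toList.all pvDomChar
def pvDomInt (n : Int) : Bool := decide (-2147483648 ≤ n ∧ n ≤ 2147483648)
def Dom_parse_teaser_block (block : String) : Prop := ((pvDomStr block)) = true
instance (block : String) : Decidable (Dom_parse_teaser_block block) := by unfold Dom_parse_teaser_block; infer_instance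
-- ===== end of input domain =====

-- B re-implements the parser as a split-then-map two-stage pipeline (cut segments at
-- 'Platform:' lines, then turn each segment into a record) instead of A's single
-- interleaved accumulator loop with a flush guard; same return value, similar cost.


-- ===== PORT A =====
-- line.split(":", 1)[1].strip(); every call site guards with startswith("…:"),
-- so the split always has a second part and the [1] indexing cannot raise.
def pvValA (line : String) : String :=
  PySem.Str.strip (((PySem.Str.splitMax? line ":" 1).getD []).getD 1 "")

def pvStepA (st : List (PySem.Dict String String) × PySem.Dict String String) (line : String) :
    List (PySem.Dict String String) × PySem.Dict String String :=
  if PySem.Str.startswith line "Platform:" then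
    ((if st.2.size ≠ 0 then st.1 ++ [st.2] else st.1),
     (PySem.Dict.empty).insert "platform" (pvValA line))
  else if PySem.Str.startswith line "TeaserTheme:" then
    (st.1, st.2.insert "teaser_theme" (pvValA line))
  else if PySem.Str.startswith line "Message:" then
    (st.1, st.2.insert "message" (pvValA line))
  else st

def parse_teaser_block (block : String) : List (List (String × String)) :=
  let lines := (PySem.Str.split? (PySem.Str.strip block) "\n").getD []
  let st := lines.foldl pvStepA ([], PySem.Dict.empty)
  (if st.2.size ≠ 0 then st.1 ++ [st.2] else st.1).map PySem.Dict.items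

-- ===== PORT B =====
def pvValB (line : String) : String :=
  PySem.Str.strip (((PySem.Str.splitMax? line ":" 1).getD []).getD 1 "")

-- stage 1: cut the line list into segments, starting a new one at each 'Platform:' line
def pvSplitStep (st : List (List String) × List String) (line : String) :
    List (List String) × List String :=
  if PySem.Str.startswith line "Platform:" then (st.1 ++ [st.2], [line])
  else (st.1, st.2 ++ [line])

-- stage 2: one segment → one record
def pvSegDict (seg : List String) : PySem.Dict String String :=
  seg.foldl (fun d line =>
    if PySem.Str.startswith line "Platform:" then d.insert "platform" (pvValB line)
    else if PySem.Str.startswith line "TeaserTheme:" then d.insert "teaser_theme" (pvValB line)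
    else if PySem.Str.startswith line "Message:" then d.insert "message" (pvValB line)
    else d) PySem.Dict.empty

def pvEmitStep (ts : List (List (String × String))) (seg : List String) :
    List (List (String × String)) :=
  let d := pvSegDict seg
  if d.size ≠ 0 then ts ++ [d.items] else ts

def parse_teaser_block_alt (block : String) : List (List (String × String)) :=
  let lines := (PySem.Str.split? (PySem.Str.strip block) "\n").getD []
  let st := lines.foldl pvSplitStep ([], [])
  (st.1 ++ [st.2]).foldl pvEmitStep []

-- ===== PRECONDITION & SPEC =====
def Spec_parse_teaser_block (block : String) (out : List (List (String × String))) : Prop := out = parse_teaser_block_alt block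
instance (block : String) (out : List (List (String × String))) : Decidable (Spec_parse_teaser_block block out) := by unfold Spec_parse_teaser_block; infer_instance

-- ===== CLAIM (what is proved, stated in full; the proofs are below) =====
def Claim_equal_parse_teaser_block : Prop := ∀ (block : String), Dom_parse_teaser_block block → Spec_parse_teaser_block block (parse_teaser_block block)

-- ===== LEMMAS AND PROOFS =====

-- A's final flush, as a function of the loop state
def pvFlushA (st : List (PySem.Dict String String) × PySem.Dict String String) :
    List (PySem.Dict String String) :=
  if st.2.size ≠ 0 then st.1 ++ [st.2] else st.1

-- recursive reference form of A's loop
def pvGo (d : PySem.Dict String String) : List String → List (PySem.Dict String String)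
  | [] => if d.size ≠ 0 then [d] else []
  | l :: ls =>
    if PySem.Str.startswith l "Platform:" then
      (if d.size ≠ 0 then [d] else []) ++ pvGo ((PySem.Dict.empty).insert "platform" (pvValB l)) ls
    else if PySem.Str.startswith l "TeaserTheme:" then pvGo (d.insert "teaser_theme" (pvValB l)) ls
    else if PySem.Str.startswith l "Message:" then pvGo (d.insert "message" (pvValB l)) ls
    else pvGo d ls

-- recursive reference form of B's segment splitter
def pvSplitRec (seg : List String) : List String → List (List String)
  | [] => [seg]
  | l :: ls =>
    if PySem.Str.startswith l "Platform:" then seg :: pvSplitRec [l] ls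
    else pvSplitRec (seg ++ [l]) ls

def pvEmit (segs : List (List String)) : List (List (String × String)) :=
  segs.flatMap (fun seg => if (pvSegDict seg).size ≠ 0 then [(pvSegDict seg).items] else [])

theorem pvVal_eq : pvValA = pvValB := rfl

theorem lemA (ls : List String) :
    ∀ (ts : List (PySem.Dict String String)) (d : PySem.Dict String String),
    pvFlushA (ls.foldl pvStepA (ts, d)) = ts ++ pvGo d ls := by
  induction ls with
  | nil =>
    intro ts d
    simp only [List.foldl_nil, pvFlushA, pvGo]
    split <;> simp
  | cons l ls ih =>
    intro ts d
    rw [List.foldl_cons]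
    by_cases h1 : PySem.Str.startswith l "Platform:" = true
    · rw [show pvStepA (ts, d) l =
          ((if d.size ≠ 0 then ts ++ [d] else ts), (PySem.Dict.empty).insert "platform" (pvValA l))
          from by simp only [pvStepA, if_pos h1]]
      rw [ih,
          show pvGo d (l :: ls) =
            (if d.size ≠ 0 then [d] else []) ++ pvGo ((PySem.Dict.empty).insert "platform" (pvValB l)) ls
          from by simp only [pvGo, if_pos h1],
          pvVal_eq]
      split_ifs <;> simp
    · by_cases h2 : PySem.Str.startswith l "TeaserTheme:" = true
      · rw [show pvStepA (ts, d) l = (ts, d.insert "teaser_theme" (pvValA l))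
            from by simp only [pvStepA, if_neg h1, if_pos h2],
            ih,
            show pvGo d (l :: ls) = pvGo (d.insert "teaser_theme" (pvValB l)) ls
            from by simp only [pvGo, if_neg h1, if_pos h2],
            pvVal_eq]
      · by_cases h3 : PySem.Str.startswith l "Message:" = true
        · rw [show pvStepA (ts, d) l = (ts, d.insert "message" (pvValA l))
              from by simp only [pvStepA, if_neg h1, if_neg h2, if_pos h3],
              ih,
              show pvGo d (l :: ls) = pvGo (d.insert "message" (pvValB l)) ls
              from by simp only [pvGo, if_neg h1, if_neg h2, if_pos h3],
              pvVal_eq]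
        · rw [show pvStepA (ts, d) l = (ts, d)
              from by simp only [pvStepA, if_neg h1, if_neg h2, if_neg h3],
              ih,
              show pvGo d (l :: ls) = pvGo d ls
              from by simp only [pvGo, if_neg h1, if_neg h2, if_neg h3]]

theorem lemB1 (ls : List String) :
    ∀ (segs : List (List String)) (seg : List String),
    (ls.foldl pvSplitStep (segs, seg)).1 ++ [(ls.foldl pvSplitStep (segs, seg)).2] =
      segs ++ pvSplitRec seg ls := by
  induction ls with
  | nil => intro segs seg; simp [pvSplitRec]
  | cons l ls ih =>
    intro segs seg
    rw [List.foldl_cons]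
    by_cases h1 : PySem.Str.startswith l "Platform:" = true
    · rw [show pvSplitStep (segs, seg) l = (segs ++ [seg], [l])
          from by simp only [pvSplitStep, if_pos h1],
          ih,
          show pvSplitRec seg (l :: ls) = seg :: pvSplitRec [l] ls
          from by simp only [pvSplitRec, if_pos h1]]
      simp
    · rw [show pvSplitStep (segs, seg) l = (segs, seg ++ [l])
          from by simp only [pvSplitStep, if_neg h1],
          ih,
          show pvSplitRec seg (l :: ls) = pvSplitRec (seg ++ [l]) ls
          from by simp only [pvSplitRec, if_neg h1]]

theorem lemB2 (segs : List (List String)) :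
    ∀ (ts : List (List (String × String))),
    segs.foldl pvEmitStep ts = ts ++ pvEmit segs := by
  induction segs with
  | nil => intro ts; simp [pvEmit]
  | cons s segs ih =>
    intro ts
    rw [List.foldl_cons,
        show pvEmit (s :: segs) =
          (if (pvSegDict s).size ≠ 0 then [(pvSegDict s).items] else []) ++ pvEmit segs
        from by simp only [pvEmit, List.flatMap_cons],
        show pvEmitStep ts s = (if (pvSegDict s).size ≠ 0 then ts ++ [(pvSegDict s).items] else ts)
        from rfl]
    split <;> rw [ih] <;> simp

theorem segDict_append (seg : List String) (l : String) :
    pvSegDict (seg ++ [l]) =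
      (if PySem.Str.startswith l "Platform:" then (pvSegDict seg).insert "platform" (pvValB l)
       else if PySem.Str.startswith l "TeaserTheme:" then (pvSegDict seg).insert "teaser_theme" (pvValB l)
       else if PySem.Str.startswith l "Message:" then (pvSegDict seg).insert "message" (pvValB l)
       else pvSegDict seg) := by
  simp only [pvSegDict, List.foldl_append, List.foldl_cons, List.foldl_nil]

theorem lemKey (ls : List String) : ∀ (seg : List String),
    pvEmit (pvSplitRec seg ls) = (pvGo (pvSegDict seg) ls).map PySem.Dict.items := by
  induction ls with
  | nil =>
    intro seg
    simp only [pvSplitRec, pvGo, pvEmit, List.flatMap_cons, List.flatMap_nil]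
    split <;> simp
  | cons l ls ih =>
    intro seg
    by_cases h1 : PySem.Str.startswith l "Platform:" = true
    · rw [show pvSplitRec seg (l :: ls) = seg :: pvSplitRec [l] ls
          from by simp only [pvSplitRec, if_pos h1],
          show pvEmit (seg :: pvSplitRec [l] ls) =
            (if (pvSegDict seg).size ≠ 0 then [(pvSegDict seg).items] else []) ++ pvEmit (pvSplitRec [l] ls)
          from by simp only [pvEmit, List.flatMap_cons],
          ih,
          show pvSegDict [l] = (PySem.Dict.empty).insert "platform" (pvValB l)
          from by simp only [pvSegDict, List.foldl_cons, List.foldl_nil, if_pos h1],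
          show pvGo (pvSegDict seg) (l :: ls) =
            (if (pvSegDict seg).size ≠ 0 then [pvSegDict seg] else []) ++
              pvGo ((PySem.Dict.empty).insert "platform" (pvValB l)) ls
          from by simp only [pvGo, if_pos h1],
          List.map_append]
      congr 1
      split <;> simp
    · rw [show pvSplitRec seg (l :: ls) = pvSplitRec (seg ++ [l]) ls
          from by simp only [pvSplitRec, if_neg h1],
          ih, segDict_append, if_neg h1]
      by_cases h2 : PySem.Str.startswith l "TeaserTheme:" = true
      · rw [if_pos h2,
            show pvGo (pvSegDict seg) (l :: ls) = pvGo ((pvSegDict seg).insert "teaser_theme" (pvValB l)) ls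
            from by simp only [pvGo, if_neg h1, if_pos h2]]
      · rw [if_neg h2]
        by_cases h3 : PySem.Str.startswith l "Message:" = true
        · rw [if_pos h3,
              show pvGo (pvSegDict seg) (l :: ls) = pvGo ((pvSegDict seg).insert "message" (pvValB l)) ls
              from by simp only [pvGo, if_neg h1, if_neg h2, if_pos h3]]
        · rw [if_neg h3,
              show pvGo (pvSegDict seg) (l :: ls) = pvGo (pvSegDict seg) ls
              from by simp only [pvGo, if_neg h1, if_neg h2, if_neg h3]]

-- ===== VERDICT (by name: the statement is the Claim_ definition above) =====
theorem parse_teaser_block_spec : Claim_equal_parse_teaser_block := by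
  intro block _
  show parse_teaser_block block = parse_teaser_block_alt block
  show (pvFlushA (((PySem.Str.split? (PySem.Str.strip block) "\n").getD []).foldl pvStepA
          ([], PySem.Dict.empty))).map PySem.Dict.items =
       ((((PySem.Str.split? (PySem.Str.strip block) "\n").getD []).foldl pvSplitStep ([], [])).1 ++
         [(((PySem.Str.split? (PySem.Str.strip block) "\n").getD []).foldl pvSplitStep ([], [])).2]).foldl
         pvEmitStep []
  rw [lemA, lemB2, lemB1]
  simp only [List.nil_append]
  exact (lemKey _ []).symm
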